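-- pv_equiv track=rewrite | github.com/NECC/Material-Do-Curso | Cadeiras não lecionadas atualmente/Laboratório de Algoritmia II/Torneios/Torneio 5/numero.py | search
-- ===== SOURCE A (Python) =====
-- def distCerta(n,k,ls,i,oc,x):
--     if len(oc[x]) == 0:
--         return True
--     if len(oc[x]) >= 2:
--         return False
--
--     return abs(oc[x][0] - i) == x+k
--
-- def valid(n,k,ls,i, oc):
--     return True
--
-- def extensions(n,k,ls,i, oc):
--     return [x for x in range(1,n+1) if distCerta(n,k,ls,i,oc,x)]
--
-- def search(n, k, ls, i, oc):
--     if i == n*2: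
--         return valid(n,k,ls,i, oc)
--
--     for x in extensions(n,k,ls,i, oc):
--         ls.append(x)
--         oc[x].append(i)
--         if search(n,k,ls,i+1, oc):
--             return True
--         oc[x].pop()
--         ls.pop()
--     return False
-- ===== SOURCE B (Python) =====
-- def search(n, k, ls, i, oc):
--     # Iterative explicit-stack backtracking (no recursion); does not mutate ls/oc:
--     # equivalence with A is about the return value only.
--     if i == 2 * n:
--         return True
--
--     def cands(j, occ):
--         out = []
--         for x in range(1, n + 1):
--             v = occ[x]
--             if len(v) == 0:
--                 out.append(x)
--             elif len(v) == 1: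
--                 if abs(v[0] - j) == x + k:
--                     out.append(x)
--         return out
--
--     def place(occ, x, j):
--         return {y: (v + [j] if y == x else v) for y, v in occ.items()}
--
--     stack = [(i, dict(oc), cands(i, oc))]
--     while stack:
--         j, occ, rem = stack.pop()
--         if not rem:
--             continue
--         x, rem = rem[0], rem[1:]
--         stack.append((j, occ, rem))
--         occ2 = place(occ, x, j)
--         if j + 1 == 2 * n:
--             return True
--         stack.append((j + 1, occ2, cands(j + 1, occ2)))
--     return False
-- ===== Notes on version B (the rewrite author's own statement) =====
-- stated objective: alternative
-- what changed: A's recursive DFS with in-place ls.append/oc[x].append and pop-undo is replaced by an iterative backtracking loop over an explicit stack of (position, occurrence-map, remaining-candidates) frames with copy-on-place state; B does not mutate the caller's ls/oc, so the equivalence is about the return value.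
import Mathlib
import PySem

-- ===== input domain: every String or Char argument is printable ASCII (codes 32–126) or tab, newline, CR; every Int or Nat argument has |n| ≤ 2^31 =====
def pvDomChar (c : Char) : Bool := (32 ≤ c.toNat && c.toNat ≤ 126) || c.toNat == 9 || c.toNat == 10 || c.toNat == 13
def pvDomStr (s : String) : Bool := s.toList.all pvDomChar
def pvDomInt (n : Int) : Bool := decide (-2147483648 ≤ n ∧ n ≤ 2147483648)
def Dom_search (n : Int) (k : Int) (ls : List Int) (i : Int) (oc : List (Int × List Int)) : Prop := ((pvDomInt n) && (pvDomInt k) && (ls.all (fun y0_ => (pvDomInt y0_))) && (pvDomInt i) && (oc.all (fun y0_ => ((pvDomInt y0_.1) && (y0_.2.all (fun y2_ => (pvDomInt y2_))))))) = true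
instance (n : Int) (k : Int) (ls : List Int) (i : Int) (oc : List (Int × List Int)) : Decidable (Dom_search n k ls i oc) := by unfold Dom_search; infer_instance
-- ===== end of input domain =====

-- B rewrites A's recursive backtracking as an iterative explicit-stack loop (alternative
-- decomposition, same cost); A mutates ls/oc in place, B does not: the equivalence proved
-- here is about the return value only.

-- ===== PORT A =====
-- Source A distCerta(n,k,ls,i,oc,x); 'oc[x]' raises KeyError when x is no key: Option, none = raise
def distCertaA (k i : Int) (oc : PySem.Dict Int (List Int)) (x : Int) : Option Bool :=
  match PySem.Dict.get? oc x with
  | none => none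
  | some l =>
    if l.length = 0 then some true
    else if 2 ≤ l.length then some false
    else
      match PySem.List.pyGet? l 0 with
      | none => none
      | some j0 => some (decide (|j0 - i| = x + k))

-- the list comprehension in Source A extensions, over the already-built range list
def extAuxA (k i : Int) (oc : PySem.Dict Int (List Int)) : List Int → Option (List Int)
  | [] => some []
  | x :: xs =>
    match distCertaA k i oc x with
    | none => none
    | some b =>
      match extAuxA k i oc xs with
      | none => none
      | some r => some (if b then x :: r else r)

def extensionsA (n k i : Int) (oc : PySem.Dict Int (List Int)) : Option (List Int) :=
  extAuxA k i oc (PySem.List.pyRange 1 (n + 1) 1)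

-- Source A search: recursion made total by fuel; each recursive call places one value into a
-- free slot of oc (a key with fewer than two occurrences), of which there are at most 2*n.
mutual
def searchA (fuel : Nat) (n k : Int) (ls : List Int) (i : Int)
    (oc : PySem.Dict Int (List Int)) : Option Bool :=
  match fuel with
  | 0 => none
  | f + 1 =>
    if i = n * 2 then some true
    else
      match extensionsA n k i oc with
      | none => none
      | some exts => tryA f n k ls i oc exts
termination_by (fuel, 0)

-- the 'for x in extensions(...)' loop body with its append / recursive call / pop undo
def tryA (f : Nat) (n k : Int) (ls : List Int) (i : Int)
    (oc : PySem.Dict Int (List Int)) (xs : List Int) : Option Bool :=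
  match xs with
  | [] => some false
  | x :: xs =>
    match searchA f n k (ls ++ [x]) (i + 1) (PySem.Dict.modify oc x [] (fun l => l ++ [i])) with
    | none => none
    | some true => some true
    | some false => tryA f n k ls i oc xs
termination_by (f, xs.length + 1)
end

def search (n : Int) (k : Int) (ls : List Int) (i : Int) (oc : List (Int × List Int)) : Bool :=
  (searchA (2 * n.toNat + 1) n k ls i (PySem.Dict.mk oc)).getD false

-- ===== PORT B =====
-- Source B cands(j, occ): accumulator loop over range(1, n+1); none = KeyError
def candAuxB (n k j : Int) (occ : PySem.Dict Int (List Int)) :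
    List Int → List Int → Option (List Int)
  | acc, [] => some acc
  | acc, x :: xs =>
    match PySem.Dict.get? occ x with
    | none => none
    | some v =>
      if v.length = 0 then candAuxB n k j occ (acc ++ [x]) xs
      else if v.length = 1 then
        match PySem.List.pyGet? v 0 with
        | none => none
        | some j0 =>
          candAuxB n k j occ (if |j0 - j| = x + k then acc ++ [x] else acc) xs
      else candAuxB n k j occ acc xs

def candsB (n k j : Int) (occ : PySem.Dict Int (List Int)) : Option (List Int) :=
  candAuxB n k j occ [] (PySem.List.pyRange 1 (n + 1) 1)

-- Source B place(occ, x, j)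
def placeB (occ : PySem.Dict Int (List Int)) (x j : Int) : PySem.Dict Int (List Int) :=
  PySem.Dict.modify occ x [] (fun v => v ++ [j])

-- the while loop over the explicit stack of (position, occurrences, remaining candidates)
-- frames; fuel is one unit per loop iteration (the port's totality device for 'while')
def runB (n k : Int) : Nat → List (Int × PySem.Dict Int (List Int) × List Int) → Option Bool
  | 0, _ => none
  | _ + 1, [] => some false
  | f + 1, (j, occ, rem) :: rest =>
    match rem with
    | [] => runB n k f rest
    | x :: rem' =>
      let occ2 := placeB occ x j
      if j + 1 = 2 * n then some true
      else
        match candsB n k (j + 1) occ2 with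
        | none => none
        | some cs => runB n k f ((j + 1, occ2, cs) :: (j, occ, rem') :: rest)

-- fuel bound for the loop: ScB n f bounds the steps spent on a subtree explored with
-- depth budget f (at most n candidates per frame)
def ScB (n : Int) : Nat → Nat
  | 0 => 0
  | f + 1 => 1 + n.toNat * (1 + ScB n f)

def search_alt (n : Int) (k : Int) (ls : List Int) (i : Int) (oc : List (Int × List Int)) : Bool :=
  if i = 2 * n then true
  else
    match candsB n k i (PySem.Dict.mk oc) with
    | none => false
    | some cs =>
      (runB n k (ScB n (2 * n.toNat + 1) + 1)
        [(i, PySem.Dict.mk oc, cs)]).getD false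

-- ===== PRECONDITION & SPEC =====
-- Pre_ excludes exactly the inputs on which Source A raises KeyError: i ≠ 2*n while some
-- x in 1..n is missing from oc (extensions then accesses oc[x] immediately); "all of
-- 1..n are keys of oc" is phrased as a count so that it is checkable in O(|oc|).
def Pre_search (n : Int) (k : Int) (ls : List Int) (i : Int) (oc : List (Int × List Int)) : Prop :=
  i = 2 * n ∨
    ((((oc.map Prod.fst).dedup.filter (fun x => decide (1 ≤ x ∧ x ≤ n))).length : Int) = max n 0)
instance (n : Int) (k : Int) (ls : List Int) (i : Int) (oc : List (Int × List Int)) : Decidable (Pre_search n k ls i oc) := by unfold Pre_search; infer_instance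

def pvWitness_search : Int × Int × List Int × Int × (List (Int × List Int)) :=
  (3, 1, [], 0, [(1, []), (2, []), (3, [])])

def Spec_search (n : Int) (k : Int) (ls : List Int) (i : Int) (oc : List (Int × List Int)) (out : Bool) : Prop := out = search_alt n k ls i oc
instance (n : Int) (k : Int) (ls : List Int) (i : Int) (oc : List (Int × List Int)) (out : Bool) : Decidable (Spec_search n k ls i oc out) := by unfold Spec_search; infer_instance

-- ===== CLAIM (what is proved, stated in full; the proofs are below) =====
def Claim_equal_search : Prop := ∀ (n : Int) (k : Int) (ls : List Int) (i : Int) (oc : List (Int × List Int)), Dom_search n k ls i oc → Pre_search n k ls i oc → Spec_search n k ls i oc (search n k ls i oc)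

-- ===== LEMMAS AND PROOFS =====

-- free placement slots: a measure that strictly decreases with each placement; it is
-- bounded by 2*n, which justifies the ports' fuel
def slotsA (n : Int) (oc : PySem.Dict Int (List Int)) : Nat :=
  (PySem.List.pyRange 1 (n + 1) 1).foldl
    (fun a x => a + (2 - (PySem.Dict.getD oc x []).length)) 0

-- every key 1..n present
def KeysOK (n : Int) (occ : PySem.Dict Int (List Int)) : Prop :=
  ∀ x ∈ PySem.List.pyRange 1 (n + 1) 1, (PySem.Dict.get? occ x).isSome = true

-- Nat version of foldl-to-sum (PySem.List.foldl_add is stated for Int only)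
theorem pvFoldlAddNat (g : Int → Nat) : ∀ (l : List Int) (a : Nat),
    l.foldl (fun acc x => acc + g x) a = a + (l.map g).sum := by
  intro l
  induction l with
  | nil => simp
  | cons x xs ih => intro a; simp [ih, Nat.add_assoc]

theorem candAuxB_eq (n k j : Int) (occ : PySem.Dict Int (List Int)) :
    ∀ xs acc, candAuxB n k j occ acc xs =
      (extAuxA k j occ xs).map (fun r => acc ++ r) := by
  intro xs
  induction xs with
  | nil => intro acc; simp [candAuxB, extAuxA]
  | cons x xs ih =>
    intro acc
    simp only [candAuxB, extAuxA, distCertaA]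
    cases hg : PySem.Dict.get? occ x with
    | none => simp
    | some v =>
      by_cases h0 : v.length = 0
      · simp only [h0, ih, if_true]
        cases he : extAuxA k j occ xs <;> simp [List.append_assoc]
      · by_cases h2 : 2 ≤ v.length
        · have h1 : ¬ v.length = 1 := by omega
          simp only [if_neg h0, if_pos h2, if_neg h1, ih]
          cases he : extAuxA k j occ xs <;> simp
        · have h1 : v.length = 1 := by omega
          simp only [if_neg h0, if_neg h2, if_pos h1]
          cases hp : PySem.List.pyGet? v 0 with
          | none => simp
          | some j0 =>
            by_cases hd : |j0 - j| = x + k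
            · simp only [hd, ih, decide_true, if_true]
              cases he : extAuxA k j occ xs <;> simp [List.append_assoc]
            · simp only [if_neg hd, ih, decide_eq_true_eq]
              cases he : extAuxA k j occ xs <;> simp

theorem candsB_eq (n k j : Int) (occ : PySem.Dict Int (List Int)) :
    candsB n k j occ = extensionsA n k j occ := by
  simp only [candsB, extensionsA, candAuxB_eq]
  cases extAuxA k j occ (PySem.List.pyRange 1 (n + 1) 1) <;> simp

theorem extAuxA_mem (k j : Int) (occ : PySem.Dict Int (List Int)) :
    ∀ xs r, extAuxA k j occ xs = some r →
      ∀ x ∈ r, x ∈ xs ∧ distCertaA k j occ x = some true := by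
  intro xs
  induction xs with
  | nil =>
    intro r hr x hx
    simp only [extAuxA, Option.some.injEq] at hr
    subst hr; simp at hx
  | cons y ys ih =>
    intro r hr x hx
    simp only [extAuxA] at hr
    cases hd : distCertaA k j occ y with
    | none => rw [hd] at hr; cases hr
    | some b =>
      rw [hd] at hr
      cases he : extAuxA k j occ ys with
      | none => rw [he] at hr; cases hr
      | some r' =>
        rw [he] at hr
        cases b with
        | true =>
          simp only [if_true, Option.some.injEq] at hr
          subst hr
          rcases hx with _ | hx'
          · exact ⟨List.mem_cons_self .., hd⟩
          · have := ih r' he x (by assumption)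
            exact ⟨List.mem_cons_of_mem _ this.1, this.2⟩
        | false =>
          simp only [Bool.false_eq_true, if_false, Option.some.injEq] at hr
          subst hr
          have := ih r' he x hx
          exact ⟨List.mem_cons_of_mem _ this.1, this.2⟩

theorem extAuxA_len (k j : Int) (occ : PySem.Dict Int (List Int)) :
    ∀ xs r, extAuxA k j occ xs = some r → r.length ≤ xs.length := by
  intro xs
  induction xs with
  | nil =>
    intro r hr
    simp only [extAuxA, Option.some.injEq] at hr
    subst hr; simp
  | cons y ys ih =>
    intro r hr
    simp only [extAuxA] at hr
    cases hd : distCertaA k j occ y with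
    | none => rw [hd] at hr; cases hr
    | some b =>
      rw [hd] at hr
      cases he : extAuxA k j occ ys with
      | none => rw [he] at hr; cases hr
      | some r' =>
        rw [he] at hr
        have hy := ih r' he
        cases b with
        | true =>
          simp only [if_true, Option.some.injEq] at hr
          subst hr; simp only [List.length_cons]; omega
        | false =>
          simp only [Bool.false_eq_true, if_false, Option.some.injEq] at hr
          subst hr; simp only [List.length_cons]; omega

theorem extAuxA_isSome (k j : Int) (occ : PySem.Dict Int (List Int)) :
    ∀ xs, (∀ x ∈ xs, (PySem.Dict.get? occ x).isSome = true) →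
      (extAuxA k j occ xs).isSome = true := by
  intro xs
  induction xs with
  | nil => intro _; simp [extAuxA]
  | cons y ys ih =>
    intro h
    simp only [extAuxA]
    have hy := h y (List.mem_cons_self ..)
    obtain ⟨l, hl⟩ := Option.isSome_iff_exists.mp hy
    simp only [distCertaA, hl]
    have hys := ih (fun x hx => h x (List.mem_cons_of_mem _ hx))
    obtain ⟨r, hr⟩ := Option.isSome_iff_exists.mp hys
    by_cases h0 : l.length = 0
    · simp [h0, hr]
    · by_cases h2 : 2 ≤ l.length
      · simp [h0, h2, hr]
      · have h1 : l.length = 1 := by omega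
        obtain ⟨a, ha⟩ := List.length_eq_one_iff.mp h1
        subst ha
        simp [hr]

theorem distCertaA_true (k j x : Int) (occ : PySem.Dict Int (List Int))
    (h : distCertaA k j occ x = some true) :
    ∃ l, PySem.Dict.get? occ x = some l ∧ l.length ≤ 1 := by
  unfold distCertaA at h
  cases hg : PySem.Dict.get? occ x with
  | none => rw [hg] at h; cases h
  | some l =>
    rw [hg] at h
    refine ⟨l, rfl, ?_⟩
    by_cases h0 : l.length = 0
    · omega
    · by_cases h2 : 2 ≤ l.length
      · simp [h0, h2] at h
      · omega

theorem keysOK_place (n : Int) (occ : PySem.Dict Int (List Int)) (x j : Int)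
    (h : KeysOK n occ) : KeysOK n (placeB occ x j) := by
  intro y hy
  have := h y hy
  rw [← PySem.Dict.contains_eq_isSome_get?] at this ⊢
  simp [placeB, PySem.Dict.contains_modify, this]

theorem slotsA_place (n x j : Int) (occ : PySem.Dict Int (List Int))
    (hx : x ∈ PySem.List.pyRange 1 (n + 1) 1)
    (l : List Int) (hl : PySem.Dict.get? occ x = some l) (hlen : l.length ≤ 1) :
    slotsA n (placeB occ x j) + 1 = slotsA n occ := by
  have hnd : (PySem.List.pyRange 1 (n + 1) 1).Nodup := by
    rw [PySem.List.pyRange_one]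
    exact List.nodup_range.map fun a b h => by omega
  obtain ⟨s, t, hst⟩ := List.append_of_mem hx
  rw [hst] at hnd
  have h1 := List.nodup_append.mp hnd
  have hxs : x ∉ s := fun hmem => h1.2.2 x hmem x (List.mem_cons_self ..) rfl
  have hxt : x ∉ t := (List.nodup_cons.mp h1.2.1).1
  have hgx : PySem.Dict.getD occ x [] = l := PySem.Dict.getD_of_get?_eq_some occ [] hl
  have key : ∀ y, y ≠ x →
      PySem.Dict.getD (placeB occ x j) y [] = PySem.Dict.getD occ y [] := by
    intro y hyx
    simp [placeB, PySem.Dict.getD_modify, hyx]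
  simp only [slotsA, hst, pvFoldlAddNat]
  rw [List.map_append, List.map_cons, List.map_append, List.map_cons,
    List.sum_append, List.sum_cons, List.sum_append, List.sum_cons]
  have hs' : List.map (fun y => 2 - (PySem.Dict.getD (placeB occ x j) y []).length) s =
      List.map (fun y => 2 - (PySem.Dict.getD occ y []).length) s :=
    List.map_congr_left fun y hy => by rw [key y (fun h => hxs (h ▸ hy))]
  have ht' : List.map (fun y => 2 - (PySem.Dict.getD (placeB occ x j) y []).length) t =
      List.map (fun y => 2 - (PySem.Dict.getD occ y []).length) t :=
    List.map_congr_left fun y hy => by rw [key y (fun h => hxt (h ▸ hy))]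
  have hatx : PySem.Dict.getD (placeB occ x j) x [] = l ++ [j] := by
    simp [placeB, hgx]
  rw [hs', ht', hatx, hgx]
  simp only [List.length_append, List.length_cons, List.length_nil]
  omega

theorem slotsA_le_two_n (n : Int) (occ : PySem.Dict Int (List Int)) :
    slotsA n occ ≤ 2 * n.toNat := by
  simp only [slotsA, pvFoldlAddNat, Nat.zero_add]
  have h := List.sum_le_card_nsmul
    ((PySem.List.pyRange 1 (n + 1) 1).map (fun x => 2 - (PySem.Dict.getD occ x []).length)) 2
    (by intro y hy; obtain ⟨x, _, hx⟩ := List.mem_map.mp hy; omega)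
  simp only [List.length_map, PySem.List.length_pyRange_one, smul_eq_mul] at h
  omega

theorem keysOK_of_count (n : Int) (oc : List (Int × List Int))
    (h : ((((oc.map Prod.fst).dedup.filter
        (fun x => decide (1 ≤ x ∧ x ≤ n))).length : Int) = max n 0)) :
    KeysOK n (PySem.Dict.mk oc) := by
  intro x hx
  rw [PySem.List.mem_pyRange_one] at hx
  set L := (oc.map Prod.fst).dedup.filter (fun x => decide (1 ≤ x ∧ x ≤ n)) with hL
  have hnd : L.Nodup := (List.nodup_dedup _).filter _
  have hsub : L.toFinset ⊆ Finset.Icc 1 n := by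
    intro y hy
    rw [List.mem_toFinset, hL, List.mem_filter] at hy
    simp only [decide_eq_true_eq] at hy
    rw [Finset.mem_Icc]
    exact hy.2
  have hcard : (Finset.Icc (1 : Int) n).card ≤ L.toFinset.card := by
    rw [List.toFinset_card_of_nodup hnd, Int.card_Icc]
    omega
  have heq : L.toFinset = Finset.Icc 1 n := Finset.eq_of_subset_of_card_le hsub hcard
  have hxL : x ∈ L := by
    rw [← List.mem_toFinset, heq, Finset.mem_Icc]; omega
  have hxk : x ∈ oc.map Prod.fst := List.mem_dedup.mp (List.mem_of_mem_filter hxL)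
  rw [← PySem.Dict.contains_eq_isSome_get?, PySem.Dict.contains_iff_mem_keys]
  simpa using hxk

theorem searchA_total (n k : Int) :
    ∀ f occ, slotsA n occ < f → KeysOK n occ →
      ∀ ls j, (searchA f n k ls j occ).isSome = true := by
  intro f
  induction f using Nat.strong_induction_on with
  | _ f IH =>
    intro occ hs hK ls j
    obtain ⟨s, rfl⟩ : ∃ s, f = s + 1 := ⟨f - 1, by omega⟩
    by_cases hj : j = n * 2
    · simp [searchA, hj]
    · have hext : (extensionsA n k j occ).isSome = true :=
        extAuxA_isSome k j occ _ hK
      obtain ⟨cs, hcs⟩ := Option.isSome_iff_exists.mp hext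
      have hmem := extAuxA_mem k j occ _ cs hcs
      have key : ∀ xs, (∀ x ∈ xs, x ∈ PySem.List.pyRange 1 (n + 1) 1 ∧
            distCertaA k j occ x = some true) →
          ∀ ls', (tryA s n k ls' j occ xs).isSome = true := by
        intro xs
        induction xs with
        | nil => intro _ ls'; simp [tryA]
        | cons x xs ihx =>
          intro hm ls'
          obtain ⟨hxR, hxT⟩ := hm x (List.mem_cons_self ..)
          obtain ⟨l, hl, hlen⟩ := distCertaA_true k j x occ hxT
          have hslot := slotsA_place n x j occ hxR l hl hlen
          have hk2 := keysOK_place n occ x j hK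
          have hchild := IH s (by omega) (placeB occ x j)
            (by omega) hk2 (ls' ++ [x]) (j + 1)
          obtain ⟨b, hb⟩ := Option.isSome_iff_exists.mp hchild
          simp only [tryA]
          rw [show PySem.Dict.modify occ x [] (fun l => l ++ [j]) = placeB occ x j from rfl, hb]
          cases b
          · exact ihx (fun y hy => hm y (List.mem_cons_of_mem _ hy)) ls'
          · simp
      simp only [searchA, if_neg hj, hcs]
      exact key cs hmem ls

theorem simSearch (n k : Int) :
    ∀ fA, ∀ ls j (occ : PySem.Dict Int (List Int)) b,
      searchA fA n k ls j occ = some b → ¬ (j = n * 2) →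
      ∃ cs, candsB n k j occ = some cs ∧
        ∃ c, c ≤ ScB n fA ∧
          ∀ f rest, runB n k (c + f) ((j, occ, cs) :: rest) =
            (if b then some true else runB n k f rest) := by
  intro fA
  induction fA using Nat.strong_induction_on with
  | _ fA IH =>
    intro ls j occ b hA hj
    cases fA with
    | zero => simp [searchA] at hA
    | succ g =>
      simp only [searchA, if_neg hj] at hA
      cases hx : extensionsA n k j occ with
      | none => rw [hx] at hA; cases hA
      | some cs =>
        rw [hx] at hA
        refine ⟨cs, by rw [candsB_eq]; exact hx, ?_⟩
        have T : ∀ xs ls' b', tryA g n k ls' j occ xs = some b' →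
            ∃ c, c ≤ 1 + xs.length * (1 + ScB n g) ∧
              ∀ f rest, runB n k (c + f) ((j, occ, xs) :: rest) =
                (if b' then some true else runB n k f rest) := by
          intro xs
          induction xs with
          | nil =>
            intro ls' b' ht
            simp only [tryA, Option.some.injEq] at ht
            refine ⟨1, by omega, ?_⟩
            intro f rest
            rw [show 1 + f = f + 1 from by omega]
            simp [runB, ← ht]
          | cons x xs ihx =>
            intro ls' b' ht
            simp only [tryA] at ht
            cases hr : searchA g n k (ls' ++ [x]) (j + 1)
                (PySem.Dict.modify occ x [] (fun l => l ++ [j])) with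
            | none => rw [hr] at ht; simp at ht
            | some cb =>
              rw [hr] at ht
              cases cb with
              | true =>
                simp only [Option.some.injEq] at ht
                by_cases h2n : j + 1 = 2 * n
                · refine ⟨1, by omega, ?_⟩
                  intro f rest
                  rw [show 1 + f = f + 1 from by omega]
                  simp [runB, h2n, ← ht]
                · have hj2 : ¬ (j + 1 = n * 2) := by omega
                  obtain ⟨cs', hcs', c', hc', hrun'⟩ :=
                    IH g (by omega) (ls' ++ [x]) (j + 1) _ true hr hj2
                  refine ⟨1 + c', ?_, ?_⟩
                  · have hle : 1 + ScB n g ≤ (xs.length + 1) * (1 + ScB n g) :=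
                      Nat.le_mul_of_pos_left _ (by omega)
                    simp only [List.length_cons]; omega
                  · intro f rest
                    rw [show 1 + c' + f = (c' + f) + 1 from by omega]
                    simp only [runB, placeB, if_neg h2n, hcs']
                    have h1 := hrun' f ((j, occ, xs) :: rest)
                    simp only [if_true] at h1
                    rw [h1, ← ht]
                    simp
              | false =>
                have h2n : ¬ (j + 1 = 2 * n) := by
                  intro h2
                  cases g with
                  | zero => simp [searchA] at hr
                  | succ g' =>
                    simp [searchA, show j + 1 = n * 2 from by omega] at hr
                obtain ⟨cs', hcs', c', hc', hrun'⟩ :=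
                  IH g (by omega) (ls' ++ [x]) (j + 1) _ false hr (by omega)
                obtain ⟨c'', hc'', hrun''⟩ := ihx ls' b' ht
                refine ⟨1 + c' + c'', ?_, ?_⟩
                · simp only [List.length_cons]
                  have hexp : (xs.length + 1) * (1 + ScB n g) =
                      xs.length * (1 + ScB n g) + (1 + ScB n g) := by ring
                  omega
                · intro f rest
                  rw [show 1 + c' + c'' + f = (c' + (c'' + f)) + 1 from by omega]
                  simp only [runB, placeB, if_neg h2n, hcs']
                  have h1 := hrun' (c'' + f) ((j, occ, xs) :: rest)
                  simp only [Bool.false_eq_true, if_false] at h1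
                  rw [h1, hrun'' f rest]
        obtain ⟨c, hc, hrun⟩ := T cs ls b hA
        refine ⟨c, ?_, hrun⟩
        have hlen : cs.length ≤ n.toNat := by
          have h2 := extAuxA_len k j occ _ cs hx
          rwa [PySem.List.length_pyRange_one,
            show (n + 1 - 1).toNat = n.toNat from by omega] at h2
        have hmul : cs.length * (1 + ScB n g) ≤ n.toNat * (1 + ScB n g) :=
          Nat.mul_le_mul_right _ hlen
        simp only [ScB]; omega

-- ===== VERDICT (by name: the statement is the Claim_ definition above) =====
theorem search_spec : Claim_equal_search := by
  intro n k ls i oc hdom hpre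
  unfold Spec_search
  by_cases hi : i = 2 * n
  · have h2 : i = n * 2 := by omega
    have hs : search n k ls i oc = true := by simp [search, searchA, h2]
    have ha : search_alt n k ls i oc = true := by simp [search_alt, hi]
    rw [hs, ha]
  · have hkeys : KeysOK n (PySem.Dict.mk oc) := by
      cases hpre with
      | inl h => exact absurd h hi
      | inr h => exact keysOK_of_count n oc h
    have htot := searchA_total n k (2 * n.toNat + 1) (PySem.Dict.mk oc)
      (by have := slotsA_le_two_n n (PySem.Dict.mk oc); omega) hkeys ls i
    obtain ⟨b, hb⟩ := Option.isSome_iff_exists.mp htot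
    obtain ⟨cs, hcs, c, hc, hrun⟩ :=
      simSearch n k _ ls i (PySem.Dict.mk oc) b hb (by omega)
    have hsa : search n k ls i oc = b := by simp [search, hb]
    rw [hsa]
    obtain ⟨m, hm⟩ : ∃ m, ScB n (2 * n.toNat + 1) + 1 - c = m + 1 :=
      ⟨ScB n (2 * n.toNat + 1) - c, by omega⟩
    have hfuel : ScB n (2 * n.toNat + 1) + 1 = c + (m + 1) := by omega
    simp only [search_alt, if_neg hi, hcs]
    rw [hfuel, hrun (m + 1) []]
    cases b
    · simp [runB]
    · simp
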